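-- pv_equiv track=rewrite | github.com/RIshimoto/AtCoder_myPractice | ARC/ARC142/arc142_b.py | solve
-- ===== SOURCE A (Python) =====
-- def solve(N):
--     table = [[0 for _ in range(N)] for _ in range(N)]
--     n = 1
--     for i in range(N):
--         for j in range(0, N, 2):
--             table[i][j] = n
--             n += 1
--
--         for j in range(1, N, 2):
--             table[i][j] = n
--             n += 1
--     return table
-- ===== SOURCE B (Python) =====
-- def solve(N):
--     half = (N + 1) // 2
--     return [[i * N + (j // 2 if j % 2 == 0 else half + (j - 1) // 2) + 1
--              for j in range(N)]
--             for i in range(N)]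
-- ===== Notes on version B (the rewrite author's own statement) =====
-- stated objective: simpler
-- what changed: Replaced the running counter with two sequential even/odd fill passes per row by a closed-form per-cell formula (i*N + even/odd offset of j + 1) computed in a single nested comprehension.
import Mathlib
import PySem

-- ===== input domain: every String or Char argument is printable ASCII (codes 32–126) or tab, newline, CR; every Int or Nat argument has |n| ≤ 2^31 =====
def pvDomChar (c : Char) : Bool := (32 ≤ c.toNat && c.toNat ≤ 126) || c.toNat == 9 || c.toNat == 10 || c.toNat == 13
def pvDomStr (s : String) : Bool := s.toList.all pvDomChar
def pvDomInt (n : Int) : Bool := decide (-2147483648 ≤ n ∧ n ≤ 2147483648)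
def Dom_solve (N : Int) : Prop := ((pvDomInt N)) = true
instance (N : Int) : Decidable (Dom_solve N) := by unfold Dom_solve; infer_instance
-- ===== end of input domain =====

-- B replaces A's running counter and its two sequential even/odd fill passes per row by a
-- closed-form per-cell formula computed in one nested comprehension; objective: simpler.

-- ===== PORT A =====
-- table[i][j] = v; the indices A uses come from range(), hence are nonnegative and in range,
-- where the total pySetD/pyGetD forms are exact
def setA (t : List (List Int)) (i j v : Int) : List (List Int) :=
  PySem.List.pySetD t i (PySem.List.pySetD (PySem.List.pyGetD t i []) j v)

-- one assignment 'table[i][j] = n; n += 1' of A's inner loops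
def stepA (i : Int) (st : List (List Int) × Int) (j : Int) : List (List Int) × Int :=
  (setA st.1 i j st.2, st.2 + 1)

def solve (N : Int) : List (List Int) :=
  let table := (PySem.List.pyRange 0 N 1).map (fun _ => (PySem.List.pyRange 0 N 1).map (fun _ => (0 : Int)))
  ((PySem.List.pyRange 0 N 1).foldl
      (fun st i =>
        let st := (PySem.List.pyRange 0 N 2).foldl (stepA i) st
        (PySem.List.pyRange 1 N 2).foldl (stepA i) st)
      (table, 1)).1

-- ===== PORT B =====
def cellB (N half i j : Int) : Int :=
  i * N + (if PySem.Int.mod j 2 = 0 then PySem.Int.floordiv j 2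
           else half + PySem.Int.floordiv (j - 1) 2) + 1

def solve_alt (N : Int) : List (List Int) :=
  let half := PySem.Int.floordiv (N + 1) 2
  (PySem.List.pyRange 0 N 1).map (fun i =>
    (PySem.List.pyRange 0 N 1).map (fun j => cellB N half i j))

-- ===== PRECONDITION & SPEC =====
def Spec_solve (N : Int) (out : List (List Int)) : Prop := out = solve_alt N
instance (N : Int) (out : List (List Int)) : Decidable (Spec_solve N out) := by unfold Spec_solve; infer_instance

-- ===== CLAIM (what is proved, stated in full; the proofs are below) =====
def Claim_equal_solve : Prop := ∀ (N : Int), Dom_solve N → Spec_solve N (solve N)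

-- ===== LEMMAS AND PROOFS =====

-- one stride-2 fill pass over a row, characterised pointwise
theorem stride_fold (b : Nat) (cnt : Nat) (r : List Int) (c : Int) :
    ((List.range cnt).foldl (fun (st : List Int × Int) k => (st.1.set (b + 2 * k) st.2, st.2 + 1)) (r, c)).2
      = c + cnt
    ∧ ((List.range cnt).foldl (fun (st : List Int × Int) k => (st.1.set (b + 2 * k) st.2, st.2 + 1)) (r, c)).1.length
      = r.length
    ∧ ∀ p, p < r.length →
        ((List.range cnt).foldl (fun (st : List Int × Int) k => (st.1.set (b + 2 * k) st.2, st.2 + 1)) (r, c)).1.getD p 0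
          = if p % 2 = b % 2 ∧ b ≤ p ∧ p < b + 2 * cnt then c + (((p - b) / 2 : Nat) : Int)
            else r.getD p 0 := by
  induction cnt with
  | zero => simp
  | succ n ih =>
    obtain ⟨h2, hlen, hp⟩ := ih
    rw [List.range_succ, List.foldl_append] at *
    refine ⟨?_, ?_, ?_⟩
    · simp [h2]; ring
    · simp [hlen]
    · intro p hplen
      simp only [List.foldl_cons, List.foldl_nil]
      rw [List.getD_eq_getElem?_getD, List.getElem?_set]
      by_cases he : b + 2 * n = p
      · subst he
        have hlt : b + 2 * n < _ := hlen ▸ hplen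
        simp [hlt, h2]
      · simp only [if_neg he]
        rw [← List.getD_eq_getElem?_getD, hp p hplen]
        by_cases hc : p % 2 = b % 2 ∧ b ≤ p ∧ p < b + 2 * n
        · rw [if_pos hc, if_pos ⟨hc.1, hc.2.1, by omega⟩]
        · rw [if_neg hc, if_neg (by intro ⟨a1,a2,a3⟩; exact hc ⟨a1,a2, by omega⟩)]

-- the even/odd interleaved offset of column p in a row of width m, as B computes it
def offInt (m p : Nat) : Int :=
  if p % 2 = 0 then ((p / 2 : Nat) : Int)
  else (((m + 1) / 2 : Nat) : Int) + (((p - 1) / 2 : Nat) : Int)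

-- the row A's two inner passes produce when the counter starts at c
def rowSpec (m : Nat) (c : Int) : List Int := (List.range m).map (fun p => c + offInt m p)

-- A's inner-loop body at row level: row[j] = n; n += 1
def rowStep (st : List Int × Int) (j : Int) : List Int × Int :=
  (PySem.List.pySetD st.1 j st.2, st.2 + 1)

theorem step_conv (b : Nat) :
    (fun (st : List Int × Int) (k : Nat) => rowStep st ((b : Int) + 2 * (k : Int)))
      = (fun (st : List Int × Int) (k : Nat) => (st.1.set (b + 2 * k) st.2, st.2 + 1)) := by
  funext st k
  simp only [rowStep]
  rw [show ((b : Int) + 2 * (k : Int)) = ((b + 2 * k : Nat) : Int) by push_cast; ring]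
  rw [PySem.List.pySetD_natCast]

-- A's two inner passes on a single row fill it with rowSpec and advance the counter by N
theorem row_eval (N : Int) (hN : 0 < N) (r : List Int) (c : Int) (hr : r.length = N.toNat) :
    (PySem.List.pyRange 1 N 2).foldl rowStep ((PySem.List.pyRange 0 N 2).foldl rowStep (r, c))
      = (rowSpec N.toNat c, c + N) := by
  have h2 : (0 : Int) < 2 := by norm_num
  set m := N.toNat with hm
  have hNm : N = (m : Int) := by omega
  have hce : ((N - 0 + 2 - 1) / 2).toNat = (m + 1) / 2 := by omega
  have hco : (if (1:Int) < N then ((N - 1 + 2 - 1) / 2).toNat else 0) = m / 2 := by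
    split_ifs with h <;> omega
  rw [PySem.List.pyRange_of_pos 0 N h2, PySem.List.pyRange_of_pos 1 N h2,
      if_pos (by omega : (0:Int) < N), hce, hco]
  rw [List.foldl_map, List.foldl_map]
  have hs0 := step_conv 0
  have hs1 := step_conv 1
  simp only [Nat.cast_zero, Nat.cast_one] at hs0 hs1
  rw [hs0, hs1]
  obtain ⟨e2, elen, ep⟩ := stride_fold 0 ((m + 1) / 2) r c
  set res0 := (List.range ((m + 1) / 2)).foldl
      (fun (st : List Int × Int) k => (st.1.set (0 + 2 * k) st.2, st.2 + 1)) (r, c) with hres0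
  obtain ⟨o2, olen, op⟩ := stride_fold 1 (m / 2) res0.1 res0.2
  rw [show res0 = (res0.1, res0.2) from rfl] at *
  set F := (List.range (m / 2)).foldl
      (fun (st : List Int × Int) k => (st.1.set (1 + 2 * k) st.2, st.2 + 1)) (res0.1, res0.2) with hF
  have hlenF : F.1.length = m := by rw [olen, elen, hr]
  refine Prod.ext ?_ ?_
  · apply List.ext_getElem
    · simp [hlenF, rowSpec]
    · intro p hp hp2
      have hpm : p < m := by omega
      have hpr : p < res0.1.length := by rw [elen, hr]; exact hpm
      rw [← List.getD_eq_getElem F.1 0 hp, op p hpr]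
      have hrs : (rowSpec m c)[p] = c + offInt m p := by
        simp [rowSpec]
      rw [hrs]
      by_cases hpar : p % 2 = 0
      · rw [if_neg (by omega)]
        have hpr' : p < r.length := by omega
        rw [ep p hpr', if_pos ⟨by omega, by omega, by omega⟩]
        simp only [offInt, if_pos hpar, Nat.sub_zero]
      · rw [if_pos ⟨by omega, by omega, by omega⟩, e2]
        simp only [offInt, if_neg hpar]
        push_cast
        ring
  · rw [o2, e2, hNm]
    have : (m + 1) / 2 + m / 2 = m := by omega
    rw [show (c + ↑((m + 1) / 2) + ↑(m / 2) : Int) = c + (↑((m + 1) / 2 + m / 2) : Nat) by push_cast; ring, this]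

-- the table-level inner loop factors through the row-level loop on row i
theorem factor (i : Int) (hi : 0 ≤ i) (js : List Int) :
    ∀ (t : List (List Int)) (c : Int), i.toNat < t.length →
    js.foldl (stepA i) (t, c)
      = (PySem.List.pySetD t i (js.foldl rowStep (PySem.List.pyGetD t i [], c)).1,
         (js.foldl rowStep (PySem.List.pyGetD t i [], c)).2) := by
  induction js with
  | nil =>
    intro t c h
    simp only [List.foldl_nil]
    rw [PySem.List.pySetD_of_nonneg _ _ hi, PySem.List.pyGetD_of_nonneg _ _ hi,
        List.getD_eq_getElem _ _ h, List.set_getElem_self]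
  | cons j rest ih =>
    intro t c h
    simp only [List.foldl_cons]
    have hstep : stepA i (t, c) j
        = (PySem.List.pySetD t i (PySem.List.pySetD (PySem.List.pyGetD t i []) j c), c + 1) := rfl
    rw [hstep]
    have hlen : (PySem.List.pySetD t i (PySem.List.pySetD (PySem.List.pyGetD t i []) j c)).length
        = t.length := by
      rw [PySem.List.pySetD_of_nonneg _ _ hi]; simp
    rw [ih _ _ (by rw [hlen]; exact h)]
    have hget : PySem.List.pyGetD (PySem.List.pySetD t i (PySem.List.pySetD (PySem.List.pyGetD t i []) j c)) i []
        = PySem.List.pySetD (PySem.List.pyGetD t i []) j c := by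
      rw [PySem.List.pySetD_of_nonneg _ _ hi, PySem.List.pyGetD_of_nonneg _ _ hi,
          List.getD_eq_getElem _ _ (by simpa using h), List.getElem_set_self]
    have hset : ∀ x, PySem.List.pySetD (PySem.List.pySetD t i (PySem.List.pySetD (PySem.List.pyGetD t i []) j c)) i x
        = PySem.List.pySetD t i x := by
      intro x
      rw [PySem.List.pySetD_of_nonneg _ _ hi, PySem.List.pySetD_of_nonneg _ _ hi,
          PySem.List.pySetD_of_nonneg _ _ hi, List.set_set]
    rw [hget, hset]
    rfl

theorem two_pass (N : Int) (hN : 0 < N) (i : Int) (hi : 0 ≤ i) (t : List (List Int)) (c : Int)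
    (h : i.toNat < t.length) (hrow : (PySem.List.pyGetD t i []).length = N.toNat) :
    (PySem.List.pyRange 1 N 2).foldl (stepA i) ((PySem.List.pyRange 0 N 2).foldl (stepA i) (t, c))
      = (PySem.List.pySetD t i (rowSpec N.toNat c), c + N) := by
  rw [factor i hi _ t c h]
  set R1 := (PySem.List.pyRange 0 N 2).foldl rowStep (PySem.List.pyGetD t i [], c) with hR1
  have hlt : i.toNat < (PySem.List.pySetD t i R1.1).length := by
    rw [PySem.List.pySetD_of_nonneg _ _ hi]; simpa using h
  rw [factor i hi _ _ _ hlt]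
  have hget : PySem.List.pyGetD (PySem.List.pySetD t i R1.1) i [] = R1.1 := by
    rw [PySem.List.pySetD_of_nonneg _ _ hi, PySem.List.pyGetD_of_nonneg _ _ hi,
        List.getD_eq_getElem _ _ (by simpa using h), List.getElem_set_self]
  rw [hget]
  have hR : (PySem.List.pyRange 1 N 2).foldl rowStep (R1.1, R1.2) = (rowSpec N.toNat c, c + N) := by
    rw [show (R1.1, R1.2) = R1 from rfl, hR1]
    exact row_eval N hN _ c hrow
  rw [hR]
  rw [PySem.List.pySetD_of_nonneg _ _ hi, PySem.List.pySetD_of_nonneg _ _ hi,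
      PySem.List.pySetD_of_nonneg _ _ hi, List.set_set]

-- A's outer loop: rows 0..n-1 replaced by their rowSpec, counter advanced by n*N
theorem outer (N : Int) (hN : 0 < N) (n : Nat) :
    ∀ (t : List (List Int)) (c : Int), n ≤ t.length → (∀ r ∈ t, r.length = N.toNat) →
    (List.range n).foldl
        (fun (st : List (List Int) × Int) (k : Nat) =>
          (PySem.List.pyRange 1 N 2).foldl (stepA (k : Int))
            ((PySem.List.pyRange 0 N 2).foldl (stepA (k : Int)) st))
        (t, c)
      = ((List.range n).map (fun k : Nat => rowSpec N.toNat (c + (k : Int) * N)) ++ t.drop n, c + n * N) := by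
  induction n with
  | zero => intro t c _ _; simp
  | succ n ih =>
    intro t c hle hrows
    rw [List.range_succ, List.foldl_append, ih t c (by omega) hrows]
    simp only [List.foldl_cons, List.foldl_nil]
    have hnlt : n < t.length := by omega
    have hdrop : t.drop n = t[n]'hnlt :: t.drop (n + 1) := List.drop_eq_getElem_cons hnlt
    have hlenA : ((List.range n).map (fun k : Nat => rowSpec N.toNat (c + (k : Int) * N))).length = n := by simp
    have hlen : ((List.range n).map (fun k : Nat => rowSpec N.toNat (c + (k : Int) * N)) ++ t.drop n).length
        = t.length := by simp; omega
    have hgetrow : PySem.List.pyGetD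
        ((List.range n).map (fun k : Nat => rowSpec N.toNat (c + (k : Int) * N)) ++ t.drop n) ((n : Nat) : Int) []
        = t[n]'hnlt := by
      rw [PySem.List.pyGetD_of_nonneg _ _ (by positivity), Int.toNat_natCast,
          List.getD_append_right _ _ _ _ (by omega), hlenA, Nat.sub_self, hdrop]
      rfl
    rw [two_pass N hN ((n : Nat) : Int) (by positivity) _ _
        (by rw [Int.toNat_natCast, hlen]; exact hnlt)
        (by rw [hgetrow]; exact hrows _ (List.getElem_mem hnlt))]
    refine Prod.ext ?_ ?_
    · simp only [PySem.List.pySetD_natCast]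
      rw [List.set_append, if_neg (by omega), hlenA, Nat.sub_self, hdrop]
      simp only [List.set_cons_zero]
      rw [List.map_append]
      simp
    · simp only
      push_cast
      ring

-- B's cell formula equals the counter value A stores at row k, column p
theorem cell_eq (N : Int) (hN : 0 < N) (k p : Nat) :
    cellB N (PySem.Int.floordiv (N + 1) 2) (k : Int) (p : Int)
      = (1 + (k : Int) * N) + offInt N.toNat p := by
  simp only [cellB, offInt, PySem.Int.mod, PySem.Int.floordiv, Int.fmod_eq_emod, Int.fdiv_eq_ediv]
  have hc : ((p : Int) % 2 = 0 + if (0:Int) ≤ 2 ∨ 2 ∣ (p:Int) then 0 else 2) ↔ p % 2 = 0 := by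
    simp; omega
  by_cases hpar : p % 2 = 0
  · rw [if_pos (by omega), if_pos hpar]
    simp
    omega
  · rw [if_neg (by omega), if_neg hpar]
    simp
    omega

theorem main_eq (N : Int) : solve N = solve_alt N := by
  by_cases hN : N ≤ 0
  · simp [solve, solve_alt, PySem.List.pyRange_one_eq_nil hN]
  · replace hN : 0 < N := by omega
    set m := N.toNat with hm
    have hrange : PySem.List.pyRange 0 N 1 = (List.range m).map (fun k : Nat => (k : Int)) := by
      rw [PySem.List.pyRange_one]
      simp
      rfl
    simp only [solve, solve_alt, hrange]
    rw [List.foldl_map]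
    set t0 : List (List Int) := ((List.range m).map (fun k : Nat => (k : Int))).map
        (fun _ => ((List.range m).map (fun k : Nat => (k : Int))).map (fun _ => (0 : Int))) with ht0
    have hlen0 : t0.length = m := by simp [ht0]
    have hrows0 : ∀ r ∈ t0, r.length = m := by
      intro r hr
      simp [ht0] at hr
      obtain ⟨_, _, rfl⟩ := hr
      simp
    have := outer N hN m t0 1 (by omega) hrows0
    rw [show (fun (st : List (List Int) × Int) (k : Nat) =>
          (PySem.List.pyRange 1 N 2).foldl (stepA (k : Int))
            ((PySem.List.pyRange 0 N 2).foldl (stepA (k : Int)) st))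
        = (fun (st : List (List Int) × Int) (k : Nat) =>
            let st' := (PySem.List.pyRange 0 N 2).foldl (stepA (k : Int)) st
            (PySem.List.pyRange 1 N 2).foldl (stepA (k : Int)) st') from rfl] at this
    rw [this]
    rw [List.drop_eq_nil_of_le (by omega), List.append_nil]
    rw [List.map_map]
    apply List.map_congr_left
    intro k hk
    simp only [Function.comp]
    rw [rowSpec, List.map_map]
    apply List.map_congr_left
    intro p hp
    simp only [Function.comp]
    rw [cell_eq N hN k p]

-- ===== VERDICT (by name: the statement is the Claim_ definition above) =====
theorem solve_spec : Claim_equal_solve := by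
  intro N _
  unfold Spec_solve
  exact main_eq N
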